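-- pv_equiv track=rewrite | github.com/TongXuanVu/FedCap | FedCAP/Fed_utils.py | FedKey
-- ===== SOURCE A (Python) =====
-- def FedKey(model_g_key,model_g_key_list,local_key,local_key_list):
--     for i in range(len(local_key)):
--         temp_key=local_key[i]
--         temp_key_list=local_key_list[i]
--         for j in range(len(temp_key_list)):
--             if model_g_key_list[j]==0 and temp_key_list[j]==1:
--                 model_g_key[j]=temp_key[j]
--                 model_g_key_list[j]=1
--     return model_g_key,model_g_key_list
-- ===== SOURCE B (Python) =====
-- def FedKey(model_g_key, model_g_key_list, local_key, local_key_list):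
--     # Position-major merge: for each global position still unset, take the first
--     # local key that flags it.  Mutates both global lists in place, like A.
--     n_local = len(local_key)
--     for j in range(len(model_g_key_list)):
--         if model_g_key_list[j] != 0:
--             continue
--         for i in range(n_local):
--             kl = local_key_list[i]
--             if j < len(kl) and kl[j] == 1:
--                 model_g_key[j] = local_key[i][j]
--                 model_g_key_list[j] = 1
--                 break
--     return model_g_key, model_g_key_list
-- ===== Notes on version B (the rewrite author's own statement) =====
-- stated objective: alternative
-- what changed: Transposed the traversal: instead of A's local-key-major double loop that conditionally overwrites each position, B iterates position-major over the global key list and, for each still-unset position, scans the local keys for the first one flagging it and breaks; both mutate the two global lists in place and return them.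
import Mathlib
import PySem

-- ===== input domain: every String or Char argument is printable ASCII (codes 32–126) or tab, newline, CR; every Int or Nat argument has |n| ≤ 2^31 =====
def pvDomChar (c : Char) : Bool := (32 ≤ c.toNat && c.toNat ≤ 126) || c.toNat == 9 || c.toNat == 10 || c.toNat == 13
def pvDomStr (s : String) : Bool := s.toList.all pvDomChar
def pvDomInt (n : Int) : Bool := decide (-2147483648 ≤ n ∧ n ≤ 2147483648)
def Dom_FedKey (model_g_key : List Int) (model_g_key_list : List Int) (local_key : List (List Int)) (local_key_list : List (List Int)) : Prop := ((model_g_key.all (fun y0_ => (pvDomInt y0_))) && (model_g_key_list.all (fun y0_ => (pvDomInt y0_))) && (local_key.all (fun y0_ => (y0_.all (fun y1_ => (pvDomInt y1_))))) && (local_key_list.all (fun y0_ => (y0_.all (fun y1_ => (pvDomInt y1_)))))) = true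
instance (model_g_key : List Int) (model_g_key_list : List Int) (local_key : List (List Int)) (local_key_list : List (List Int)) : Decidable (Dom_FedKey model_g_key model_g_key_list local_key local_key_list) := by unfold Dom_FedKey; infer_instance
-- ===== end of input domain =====

-- B merges the keys position-major (first local key flagging each still-unset
-- position, with an early break) instead of A's local-key-major double loop;
-- same cost class, different traversal.  Both Pythons mutate model_g_key and
-- model_g_key_list in place identically; the theorems are about the returned pair.

-- ===== PORT A =====
-- inner loop of A: 'for j in range(len(temp_key_list)): if model_g_key_list[j]==0 and temp_key_list[j]==1: …'
def stepI (tk tkl : List Int) (st : List Int × List Int) (j : Nat) : List Int × List Int :=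
  if st.2.getD j 0 = 0 ∧ tkl.getD j 0 = 1 then (st.1.set j (tk.getD j 0), st.2.set j 1) else st

-- one iteration of A's outer loop (body for local key i)
def stepO (lk lkl : List (List Int)) (st : List Int × List Int) (i : Nat) : List Int × List Int :=
  (List.range (lkl.getD i []).length).foldl (stepI (lk.getD i []) (lkl.getD i [])) st

def FedKey (model_g_key : List Int) (model_g_key_list : List Int) (local_key : List (List Int)) (local_key_list : List (List Int)) : List Int × List Int :=
  (List.range local_key.length).foldl (stepO local_key local_key_list) (model_g_key, model_g_key_list)

-- ===== PORT B =====
-- B's inner 'for i in range(n_local): … break' loop: first local key flagging position j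
def scanB (lk lkl : List (List Int)) (j : Nat) : List Nat → Option Int
  | [] => none
  | i :: rest =>
      if j < (lkl.getD i []).length ∧ (lkl.getD i []).getD j 0 = 1 then
        some ((lk.getD i []).getD j 0)
      else scanB lk lkl j rest

-- body of B's position-major loop (position j)
def stepB (lk lkl : List (List Int)) (st : List Int × List Int) (j : Nat) : List Int × List Int :=
  if st.2.getD j 0 ≠ 0 then st
  else
    match scanB lk lkl j (List.range lk.length) with
    | some v => (st.1.set j v, st.2.set j 1)
    | none => st

def FedKey_alt (model_g_key : List Int) (model_g_key_list : List Int) (local_key : List (List Int)) (local_key_list : List (List Int)) : List Int × List Int :=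
  (List.range model_g_key_list.length).foldl (stepB local_key local_key_list) (model_g_key, model_g_key_list)

-- ===== PRECONDITION & SPEC =====
-- helpers Pre_ is phrased with: "local key list i flags position j", and the first such i
def pHit (lkl : List (List Int)) (j : Nat) (i : Nat) : Bool :=
  decide (j < (lkl.getD i []).length ∧ (lkl.getD i []).getD j 0 = 1)

def hitIdx (lkl : List (List Int)) (n j : Nat) : Option Nat :=
  (List.range n).find? (pHit lkl j)

-- Pre_ is exactly the inputs on which Python A returns (no IndexError): A unconditionally
-- indexes local_key_list[i] for every i < len(local_key) and model_g_key_list[j] for every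
-- j < len(local_key_list[i]) (first two conjuncts), while the reads/writes behind the guard
-- raise only when the guard actually fires, i.e. at the FIRST local key flagging a position
-- whose global flag is still 0 (third conjunct: that first hit must lie inside its own key
-- and inside model_g_key).
def Pre_FedKey (model_g_key : List Int) (model_g_key_list : List Int) (local_key : List (List Int)) (local_key_list : List (List Int)) : Prop :=
  local_key.length ≤ local_key_list.length ∧
  (∀ i, i < local_key.length → (local_key_list.getD i []).length ≤ model_g_key_list.length) ∧
  (∀ j, j < model_g_key_list.length → model_g_key_list.getD j 0 = 0 →
    ∀ i, i < local_key.length → hitIdx local_key_list local_key.length j = some i →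
      j < (local_key.getD i []).length ∧ j < model_g_key.length)

instance (model_g_key : List Int) (model_g_key_list : List Int) (local_key : List (List Int)) (local_key_list : List (List Int)) : Decidable (Pre_FedKey model_g_key model_g_key_list local_key local_key_list) := by unfold Pre_FedKey; infer_instance

def pvWitness_FedKey : List Int × List Int × List (List Int) × List (List Int) :=
  ([0, 0, 9], [0, 1, 0], [[7, 8], [4, 5, 6]], [[1, 0], [1, 1, 1]])

def Spec_FedKey (model_g_key : List Int) (model_g_key_list : List Int) (local_key : List (List Int)) (local_key_list : List (List Int)) (out : List Int × List Int) : Prop := out = FedKey_alt model_g_key model_g_key_list local_key local_key_list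
instance (model_g_key : List Int) (model_g_key_list : List Int) (local_key : List (List Int)) (local_key_list : List (List Int)) (out : List Int × List Int) : Decidable (Spec_FedKey model_g_key model_g_key_list local_key local_key_list out) := by unfold Spec_FedKey; infer_instance

-- ===== CLAIM (what is proved, stated in full; the proofs are below) =====
def Claim_equal_FedKey : Prop := ∀ (model_g_key : List Int) (model_g_key_list : List Int) (local_key : List (List Int)) (local_key_list : List (List Int)), Dom_FedKey model_g_key model_g_key_list local_key local_key_list → Pre_FedKey model_g_key model_g_key_list local_key local_key_list → Spec_FedKey model_g_key model_g_key_list local_key local_key_list (FedKey model_g_key model_g_key_list local_key local_key_list)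

-- ===== LEMMAS AND PROOFS =====

theorem getD_set' (l : List Int) (i j : Nat) (v d : Int) :
    (l.set i v).getD j d = if i = j ∧ j < l.length then v else l.getD j d := by
  simp only [List.getD_eq_getElem?_getD, List.getElem?_set]
  split_ifs <;> simp_all

theorem scanB_eq (lk lkl : List (List Int)) (j : Nat) (l : List Nat) :
    scanB lk lkl j l = (l.find? (pHit lkl j)).map (fun i => (lk.getD i []).getD j 0) := by
  induction l with
  | nil => simp [scanB]
  | cons i rest ih =>
      by_cases h : j < (lkl.getD i []).length ∧ (lkl.getD i []).getD j 0 = 1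
      · have hp : pHit lkl j i = true := decide_eq_true h
        rw [scanB, if_pos h, List.find?_cons_of_pos hp]
        rfl
      · have hp : pHit lkl j i = false := decide_eq_false h
        rw [scanB, if_neg h, List.find?_cons_of_neg (by simp [hp]), ih]

theorem hitIdx_some (lkl : List (List Int)) (n j i : Nat) (h : hitIdx lkl n j = some i) :
    i < n ∧ j < (lkl.getD i []).length ∧ (lkl.getD i []).getD j 0 = 1 := by
  have hm := List.mem_of_find?_eq_some h
  have hp := List.find?_some h
  simp [pHit] at hp
  simp at hm
  exact ⟨hm, hp⟩

theorem hitIdx_succ (lkl : List (List Int)) (n j : Nat) :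
    hitIdx lkl (n + 1) j = (hitIdx lkl n j).or (if pHit lkl j n then some n else none) := by
  cases hp : pHit lkl j n <;> simp [hitIdx, List.range_succ, List.find?_append, List.find?, hp]

theorem hitIdx_mono (lkl : List (List Int)) (j n m i : Nat) (hnm : n ≤ m)
    (h : hitIdx lkl n j = some i) : hitIdx lkl m j = some i := by
  induction m, hnm using Nat.le_induction with
  | base => exact h
  | succ m _ ih => rw [hitIdx_succ, ih]; rfl

-- length preservation
theorem stepI_len (tk tkl : List Int) (st : List Int × List Int) (j : Nat) :
    (stepI tk tkl st j).1.length = st.1.length ∧ (stepI tk tkl st j).2.length = st.2.length := by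
  unfold stepI; split_ifs <;> simp

theorem innerA_len (tk tkl : List Int) (k : Nat) (st : List Int × List Int) :
    ((List.range k).foldl (stepI tk tkl) st).1.length = st.1.length ∧
    ((List.range k).foldl (stepI tk tkl) st).2.length = st.2.length := by
  induction k generalizing st with
  | zero => simp
  | succ k ih =>
      rw [List.range_succ, List.foldl_append]
      rcases ih st with ⟨h1, h2⟩
      rcases stepI_len tk tkl ((List.range k).foldl (stepI tk tkl) st) k with ⟨g1, g2⟩
      simp only [List.foldl_cons, List.foldl_nil]
      constructor <;> omega

-- characterization of A's inner loop; the write-in-range hypothesis hw only concerns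
-- positions at which the guard can fire
theorem innerA_char (tk tkl : List Int) (k : Nat) (st : List Int × List Int)
    (hk : k ≤ tkl.length) (h2 : tkl.length ≤ st.2.length)
    (hw : ∀ p, p < tkl.length → st.2.getD p 0 = 0 → tkl.getD p 0 = 1 → p < st.1.length)
    (j : Nat) (d : Int) :
    (((List.range k).foldl (stepI tk tkl) st).1.getD j d
       = if j < k ∧ st.2.getD j 0 = 0 ∧ tkl.getD j 0 = 1 then tk.getD j 0 else st.1.getD j d)
  ∧ (((List.range k).foldl (stepI tk tkl) st).2.getD j d
       = if j < k ∧ st.2.getD j 0 = 0 ∧ tkl.getD j 0 = 1 then 1 else st.2.getD j d) := by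
  induction k generalizing j d with
  | zero => simp
  | succ k ih =>
      have hk' : k ≤ tkl.length := Nat.le_of_succ_le hk
      rw [List.range_succ, List.foldl_append, List.foldl_cons, List.foldl_nil]
      have hlen := innerA_len tk tkl k st
      have hk2 : ((List.range k).foldl (stepI tk tkl) st).2.getD k 0 = st.2.getD k 0 := by
        rw [(ih hk' k 0).2]; simp
      have hklt2 : k < st.2.length := lt_of_lt_of_le (Nat.lt_of_lt_of_le (Nat.lt_succ_self k) hk) h2
      have hstep : ∀ s : List Int × List Int, stepI tk tkl s k =
          if s.2.getD k 0 = 0 ∧ tkl.getD k 0 = 1 then (s.1.set k (tk.getD k 0), s.2.set k 1) else s :=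
        fun s => rfl
      rw [hstep]
      by_cases hc : ((List.range k).foldl (stepI tk tkl) st).2.getD k 0 = 0 ∧ tkl.getD k 0 = 1
      · rw [if_pos hc]
        have hcs : st.2.getD k 0 = 0 := hk2 ▸ hc.1
        have hklt1 : k < st.1.length :=
          hw k (Nat.lt_of_lt_of_le (Nat.lt_succ_self k) hk) hcs hc.2
        rcases ih hk' j d with ⟨i1, i2⟩
        constructor
        · rw [getD_set', i1, hlen.1]
          by_cases hjk : j = k
          · subst hjk
            rw [if_pos ⟨rfl, hklt1⟩, if_pos ⟨Nat.lt_succ_self _, hcs, hc.2⟩]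
          · have hiff : (j < k + 1 ∧ st.2.getD j 0 = 0 ∧ tkl.getD j 0 = 1) ↔ (j < k ∧ st.2.getD j 0 = 0 ∧ tkl.getD j 0 = 1) := by
              constructor
              · rintro ⟨hl, hrest⟩
                exact ⟨by omega, hrest⟩
              · rintro ⟨hl, hrest⟩
                exact ⟨by omega, hrest⟩
            rw [if_neg (fun h => hjk h.1.symm)]
            rw [if_congr hiff rfl rfl]
        · rw [getD_set', i2, hlen.2]
          by_cases hjk : j = k
          · subst hjk
            rw [if_pos ⟨rfl, hklt2⟩, if_pos ⟨Nat.lt_succ_self _, hcs, hc.2⟩]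
          · have hiff : (j < k + 1 ∧ st.2.getD j 0 = 0 ∧ tkl.getD j 0 = 1) ↔ (j < k ∧ st.2.getD j 0 = 0 ∧ tkl.getD j 0 = 1) := by
              constructor
              · rintro ⟨hl, hrest⟩
                exact ⟨by omega, hrest⟩
              · rintro ⟨hl, hrest⟩
                exact ⟨by omega, hrest⟩
            rw [if_neg (fun h => hjk h.1.symm)]
            rw [if_congr hiff rfl rfl]
      · rw [if_neg hc]
        rcases ih hk' j d with ⟨i1, i2⟩
        have hnc : j = k → ¬(st.2.getD j 0 = 0 ∧ tkl.getD j 0 = 1) := by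
          intro hjk hP; subst hjk; exact hc ⟨hk2.trans hP.1, hP.2⟩
        constructor
        · rw [i1]
          by_cases hjk : j = k
          · rw [if_neg (fun h => hnc hjk h.2), if_neg (fun h => hnc hjk h.2)]
          · have hiff : (j < k + 1 ∧ st.2.getD j 0 = 0 ∧ tkl.getD j 0 = 1) ↔ (j < k ∧ st.2.getD j 0 = 0 ∧ tkl.getD j 0 = 1) := by
              constructor
              · rintro ⟨hl, hrest⟩
                exact ⟨by omega, hrest⟩
              · rintro ⟨hl, hrest⟩
                exact ⟨by omega, hrest⟩
            rw [if_congr hiff rfl rfl]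
        · rw [i2]
          by_cases hjk : j = k
          · rw [if_neg (fun h => hnc hjk h.2), if_neg (fun h => hnc hjk h.2)]
          · have hiff : (j < k + 1 ∧ st.2.getD j 0 = 0 ∧ tkl.getD j 0 = 1) ↔ (j < k ∧ st.2.getD j 0 = 0 ∧ tkl.getD j 0 = 1) := by
              constructor
              · rintro ⟨hl, hrest⟩
                exact ⟨by omega, hrest⟩
              · rintro ⟨hl, hrest⟩
                exact ⟨by omega, hrest⟩
            rw [if_congr hiff rfl rfl]

theorem stepO_len (lk lkl : List (List Int)) (st : List Int × List Int) (i : Nat) :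
    (stepO lk lkl st i).1.length = st.1.length ∧ (stepO lk lkl st i).2.length = st.2.length := by
  unfold stepO; exact innerA_len _ _ _ st

theorem outerA_len (lk lkl : List (List Int)) (n : Nat) (st : List Int × List Int) :
    ((List.range n).foldl (stepO lk lkl) st).1.length = st.1.length ∧
    ((List.range n).foldl (stepO lk lkl) st).2.length = st.2.length := by
  induction n generalizing st with
  | zero => simp
  | succ n ih =>
      rw [List.range_succ, List.foldl_append]
      rcases ih st with ⟨a1, a2⟩
      rcases stepO_len lk lkl ((List.range n).foldl (stepO lk lkl) st) n with ⟨b1, b2⟩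
      simp only [List.foldl_cons, List.foldl_nil]
      constructor <;> omega

theorem outerA_char (lk lkl : List (List Int)) (g gl : List Int) (n : Nat)
    (hn : n ≤ lk.length)
    (hg2 : ∀ i, i < lk.length → (lkl.getD i []).length ≤ gl.length)
    (hw : ∀ j i, gl.getD j 0 = 0 → hitIdx lkl lk.length j = some i → j < g.length)
    (j : Nat) (d : Int) :
    (((List.range n).foldl (stepO lk lkl) (g, gl)).1.getD j d
       = match hitIdx lkl n j with
         | some i => if gl.getD j 0 = 0 then (lk.getD i []).getD j 0 else g.getD j d
         | none => g.getD j d)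
  ∧ (((List.range n).foldl (stepO lk lkl) (g, gl)).2.getD j d
       = if gl.getD j 0 = 0 ∧ (hitIdx lkl n j).isSome then 1 else gl.getD j d) := by
  induction n generalizing j d with
  | zero => simp [hitIdx]
  | succ n ih =>
      have hn' : n ≤ lk.length := Nat.le_of_succ_le hn
      have hnlt : n < lk.length := hn
      rw [List.range_succ, List.foldl_append, List.foldl_cons, List.foldl_nil]
      have hlens := outerA_len lk lkl n (g, gl)
      have hstep : stepO lk lkl ((List.range n).foldl (stepO lk lkl) (g, gl)) n
          = (List.range (lkl.getD n []).length).foldl (stepI (lk.getD n []) (lkl.getD n []))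
              ((List.range n).foldl (stepO lk lkl) (g, gl)) := rfl
      rw [hstep]
      -- write-in-range hypothesis for the inner characterization at local key n
      have hwI : ∀ p, p < (lkl.getD n []).length →
          ((List.range n).foldl (stepO lk lkl) (g, gl)).2.getD p 0 = 0 →
          (lkl.getD n []).getD p 0 = 1 →
          p < ((List.range n).foldl (stepO lk lkl) (g, gl)).1.length := by
        intro p hp hz h1
        have hc := (ih hn' p 0).2
        rw [hc] at hz
        have hglp : gl.getD p 0 = 0 ∧ hitIdx lkl n p = none := by
          by_cases hg : gl.getD p 0 = 0
          · refine ⟨hg, ?_⟩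
            cases hi : hitIdx lkl n p with
            | none => rfl
            | some i => rw [if_pos ⟨hg, by rw [hi]; rfl⟩] at hz; exact absurd hz one_ne_zero
          · rw [if_neg (fun hc' => hg hc'.1)] at hz; exact absurd hz hg
        have hpt : pHit lkl p n = true := decide_eq_true ⟨hp, h1⟩
        have hsn : hitIdx lkl (n + 1) p = some n := by
          rw [hitIdx_succ, hglp.2, hpt]; rfl
        have hfull : hitIdx lkl lk.length p = some n := hitIdx_mono lkl p (n + 1) lk.length n hn hsn
        rw [hlens.1]
        exact hw p n hglp.1 hfull
      have hC := innerA_char (lk.getD n []) (lkl.getD n []) (lkl.getD n []).length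
          ((List.range n).foldl (stepO lk lkl) (g, gl)) (le_refl _)
          (by rw [hlens.2]; exact hg2 n hnlt) hwI j d
      have ihj := ih hn' j d
      have ih0 := ih hn' j 0
      have hsucc := hitIdx_succ lkl n j
      rcases hres : hitIdx lkl n j with _ | i
      · -- no hit among the first n locals
        rw [hres] at ihj ih0 hsucc
        have i1 : ((List.range n).foldl (stepO lk lkl) (g, gl)).1.getD j d = g.getD j d := by
          rw [ihj.1]
        have h2' : ((List.range n).foldl (stepO lk lkl) (g, gl)).2.getD j 0 = gl.getD j 0 := by
          rw [ih0.2]; simp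
        have i2 : ((List.range n).foldl (stepO lk lkl) (g, gl)).2.getD j d = gl.getD j d := by
          rw [ihj.2]; simp
        by_cases hph : j < (lkl.getD n []).length ∧ (lkl.getD n []).getD j 0 = 1
        · have hpt : pHit lkl j n = true := decide_eq_true hph
          have hsucc2 : hitIdx lkl (n + 1) j = some n := by
            rw [hsucc, hpt]; rfl
          by_cases hgl : gl.getD j 0 = 0
          · have hcond : j < (lkl.getD n []).length ∧
                ((List.range n).foldl (stepO lk lkl) (g, gl)).2.getD j 0 = 0 ∧
                (lkl.getD n []).getD j 0 = 1 := ⟨hph.1, by rw [h2']; exact hgl, hph.2⟩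
            constructor
            · rw [hC.1, if_pos hcond, hsucc2]
              simp
              exact fun h => absurd hgl h
            · rw [hC.2, if_pos hcond, hsucc2]
              simp
              exact fun h => absurd hgl h
          · have hcond : ¬(j < (lkl.getD n []).length ∧
                ((List.range n).foldl (stepO lk lkl) (g, gl)).2.getD j 0 = 0 ∧
                (lkl.getD n []).getD j 0 = 1) := fun hc => hgl (h2' ▸ hc.2.1)
            constructor
            · rw [hC.1, if_neg hcond, i1, hsucc2]
              simp
              exact fun h => absurd h hgl
            · rw [hC.2, if_neg hcond, i2, hsucc2, if_neg (fun hc => hgl hc.1)]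
        · have hpt : pHit lkl j n = false := decide_eq_false hph
          have hsucc2 : hitIdx lkl (n + 1) j = none := by
            rw [hsucc, hpt]; rfl
          have hcond : ¬(j < (lkl.getD n []).length ∧
              ((List.range n).foldl (stepO lk lkl) (g, gl)).2.getD j 0 = 0 ∧
              (lkl.getD n []).getD j 0 = 1) := fun hc => hph ⟨hc.1, hc.2.2⟩
          constructor
          · rw [hC.1, if_neg hcond, i1, hsucc2]
          · rw [hC.2, if_neg hcond, i2, hsucc2]
            simp
      · -- first hit is some i < n: position j is already settled
        rw [hres] at ihj ih0 hsucc
        have hsucc2 : hitIdx lkl (n + 1) j = some i := by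
          rw [hsucc]; rfl
        have h2' : ((List.range n).foldl (stepO lk lkl) (g, gl)).2.getD j 0 =
            if gl.getD j 0 = 0 ∧ True then 1 else gl.getD j 0 := by
          rw [ih0.2]; simp
        have hP : ¬(j < (lkl.getD n []).length ∧
            ((List.range n).foldl (stepO lk lkl) (g, gl)).2.getD j 0 = 0 ∧
            (lkl.getD n []).getD j 0 = 1) := by
          rintro ⟨-, hz, -⟩
          rw [h2'] at hz
          by_cases hgl : gl.getD j 0 = 0
          · rw [if_pos ⟨hgl, trivial⟩] at hz; exact one_ne_zero hz
          · rw [if_neg (fun hc => hgl hc.1)] at hz; exact hgl hz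
        constructor
        · rw [hC.1, if_neg hP, ihj.1, hsucc2]
        · rw [hC.2, if_neg hP, ihj.2, hsucc2]

theorem stepB_len (lk lkl : List (List Int)) (st : List Int × List Int) (j : Nat) :
    (stepB lk lkl st j).1.length = st.1.length ∧ (stepB lk lkl st j).2.length = st.2.length := by
  unfold stepB
  split_ifs
  · exact ⟨rfl, rfl⟩
  · cases scanB lk lkl j (List.range lk.length) <;> simp

theorem foldB_len (lk lkl : List (List Int)) (m : Nat) (st : List Int × List Int) :
    ((List.range m).foldl (stepB lk lkl) st).1.length = st.1.length ∧
    ((List.range m).foldl (stepB lk lkl) st).2.length = st.2.length := by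
  induction m generalizing st with
  | zero => simp
  | succ m ih =>
      rw [List.range_succ, List.foldl_append]
      rcases ih st with ⟨a1, a2⟩
      rcases stepB_len lk lkl ((List.range m).foldl (stepB lk lkl) st) m with ⟨b1, b2⟩
      simp only [List.foldl_cons, List.foldl_nil]
      constructor <;> omega

theorem foldB_char (lk lkl : List (List Int)) (g gl : List Int) (m : Nat)
    (hg2 : ∀ i, i < lk.length → (lkl.getD i []).length ≤ gl.length)
    (hw : ∀ j i, gl.getD j 0 = 0 → hitIdx lkl lk.length j = some i → j < g.length)
    (j : Nat) (d : Int) :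
    (((List.range m).foldl (stepB lk lkl) (g, gl)).1.getD j d
       = if j < m ∧ gl.getD j 0 = 0 then
           (match hitIdx lkl lk.length j with
            | some i => (lk.getD i []).getD j 0
            | none => g.getD j d)
         else g.getD j d)
  ∧ (((List.range m).foldl (stepB lk lkl) (g, gl)).2.getD j d
       = if j < m ∧ gl.getD j 0 = 0 ∧ (hitIdx lkl lk.length j).isSome then 1 else gl.getD j d) := by
  induction m generalizing j d with
  | zero => simp
  | succ m ih =>
      rw [List.range_succ, List.foldl_append, List.foldl_cons, List.foldl_nil]
      have hlens := foldB_len lk lkl m (g, gl)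
      have h2m : ((List.range m).foldl (stepB lk lkl) (g, gl)).2.getD m 0 = gl.getD m 0 := by
        rw [(ih m 0).2]; simp
      have hscan : scanB lk lkl m (List.range lk.length)
          = (hitIdx lkl lk.length m).map (fun i => (lk.getD i []).getD m 0) :=
        scanB_eq lk lkl m (List.range lk.length)
      have hstep : stepB lk lkl ((List.range m).foldl (stepB lk lkl) (g, gl)) m
          = if ((List.range m).foldl (stepB lk lkl) (g, gl)).2.getD m 0 ≠ 0 then
              (List.range m).foldl (stepB lk lkl) (g, gl)
            else
              match scanB lk lkl m (List.range lk.length) with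
              | some v => (((List.range m).foldl (stepB lk lkl) (g, gl)).1.set m v,
                           ((List.range m).foldl (stepB lk lkl) (g, gl)).2.set m 1)
              | none => (List.range m).foldl (stepB lk lkl) (g, gl) := rfl
      rw [hstep]
      rcases ih j d with ⟨i1, i2⟩
      by_cases hgl : gl.getD m 0 = 0
      · rw [if_neg (by rw [h2m]; exact fun h => h hgl)]
        rcases hh : hitIdx lkl lk.length m with _ | i
        · rw [hh] at hscan
          simp only [Option.map_none] at hscan
          rw [hscan]
          constructor
          · rw [i1]
            by_cases hjm : j = m
            · subst hjm
              rw [if_neg (by omega : ¬(j < j ∧ gl.getD j 0 = 0)),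
                  if_pos ⟨Nat.lt_succ_self j, hgl⟩, hh]
            · have hiff : (j < m + 1 ∧ gl.getD j 0 = 0) ↔ (j < m ∧ gl.getD j 0 = 0) := by
                constructor
                · rintro ⟨hl, hr⟩; exact ⟨by omega, hr⟩
                · rintro ⟨hl, hr⟩; exact ⟨by omega, hr⟩
              rw [if_congr hiff rfl rfl]
          · rw [i2]
            by_cases hjm : j = m
            · subst hjm
              rw [if_neg (by omega : ¬(j < j ∧ gl.getD j 0 = 0 ∧ (hitIdx lkl lk.length j).isSome = true)),
                  if_neg (by rw [hh]; rintro ⟨-, -, h⟩; simp at h)]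
            · have hiff : (j < m + 1 ∧ gl.getD j 0 = 0 ∧ (hitIdx lkl lk.length j).isSome = true)
                  ↔ (j < m ∧ gl.getD j 0 = 0 ∧ (hitIdx lkl lk.length j).isSome = true) := by
                constructor
                · rintro ⟨hl, hr⟩; exact ⟨by omega, hr⟩
                · rintro ⟨hl, hr⟩; exact ⟨by omega, hr⟩
              rw [if_congr hiff rfl rfl]
        · rw [hh] at hscan
          simp only [Option.map_some] at hscan
          rw [hscan]
          rcases hitIdx_some lkl lk.length m i hh with ⟨hilt, hmlt, -⟩
          have hm1 : m < ((List.range m).foldl (stepB lk lkl) (g, gl)).1.length := by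
            rw [hlens.1]; exact hw m i hgl hh
          have hm2 : m < ((List.range m).foldl (stepB lk lkl) (g, gl)).2.length := by
            rw [hlens.2]; exact lt_of_lt_of_le hmlt (hg2 i hilt)
          constructor
          · rw [getD_set', i1]
            by_cases hjm : j = m
            · subst hjm
              rw [if_pos ⟨rfl, hm1⟩, if_pos ⟨Nat.lt_succ_self j, hgl⟩, hh]
            · rw [if_neg (fun h => hjm h.1.symm)]
              have hiff : (j < m + 1 ∧ gl.getD j 0 = 0) ↔ (j < m ∧ gl.getD j 0 = 0) := by
                constructor
                · rintro ⟨hl, hr⟩; exact ⟨by omega, hr⟩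
                · rintro ⟨hl, hr⟩; exact ⟨by omega, hr⟩
              rw [if_congr hiff rfl rfl]
          · rw [getD_set', i2]
            by_cases hjm : j = m
            · subst hjm
              rw [if_pos ⟨rfl, hm2⟩, if_pos ⟨Nat.lt_succ_self j, hgl, by rw [hh]; rfl⟩]
            · rw [if_neg (fun h => hjm h.1.symm)]
              have hiff : (j < m + 1 ∧ gl.getD j 0 = 0 ∧ (hitIdx lkl lk.length j).isSome = true)
                  ↔ (j < m ∧ gl.getD j 0 = 0 ∧ (hitIdx lkl lk.length j).isSome = true) := by
                constructor
                · rintro ⟨hl, hr⟩; exact ⟨by omega, hr⟩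
                · rintro ⟨hl, hr⟩; exact ⟨by omega, hr⟩
              rw [if_congr hiff rfl rfl]
      · rw [if_pos (by rw [h2m]; exact hgl)]
        constructor
        · rw [i1]
          by_cases hjm : j = m
          · subst hjm
            rw [if_neg (fun h => hgl h.2), if_neg (fun h => hgl h.2)]
          · have hiff : (j < m + 1 ∧ gl.getD j 0 = 0) ↔ (j < m ∧ gl.getD j 0 = 0) := by
              constructor
              · rintro ⟨hl, hr⟩; exact ⟨by omega, hr⟩
              · rintro ⟨hl, hr⟩; exact ⟨by omega, hr⟩
            rw [if_congr hiff rfl rfl]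
        · rw [i2]
          by_cases hjm : j = m
          · subst hjm
            rw [if_neg (fun h => hgl h.2.1), if_neg (fun h => hgl h.2.1)]
          · have hiff : (j < m + 1 ∧ gl.getD j 0 = 0 ∧ (hitIdx lkl lk.length j).isSome = true)
                ↔ (j < m ∧ gl.getD j 0 = 0 ∧ (hitIdx lkl lk.length j).isSome = true) := by
              constructor
              · rintro ⟨hl, hr⟩; exact ⟨by omega, hr⟩
              · rintro ⟨hl, hr⟩; exact ⟨by omega, hr⟩
            rw [if_congr hiff rfl rfl]

-- ===== VERDICT (by name: the statement is the Claim_ definition above) =====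
theorem FedKey_spec : Claim_equal_FedKey := by
  intro g gl lk lkl _hdom hpre
  unfold Spec_FedKey FedKey FedKey_alt
  obtain ⟨_hlen, hg2, hwrite⟩ := hpre
  have hw : ∀ j i, gl.getD j 0 = 0 → hitIdx lkl lk.length j = some i → j < g.length := by
    intro j i hz hh
    rcases hitIdx_some lkl lk.length j i hh with ⟨hi, hj, -⟩
    have hjg : j < gl.length := lt_of_lt_of_le hj (hg2 i hi)
    exact (hwrite j hjg hz i hi hh).2
  have hA := outerA_len lk lkl lk.length (g, gl)
  have hB := foldB_len lk lkl gl.length (g, gl)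
  have hAc := outerA_char lk lkl g gl lk.length (le_refl _) hg2 hw
  have hBc := foldB_char lk lkl g gl gl.length hg2 hw
  have hub : ∀ j i, hitIdx lkl lk.length j = some i → j < gl.length := by
    intro j i h
    rcases hitIdx_some lkl lk.length j i h with ⟨hi, hj, -⟩
    exact lt_of_lt_of_le hj (hg2 i hi)
  refine Prod.ext ?_ ?_
  · apply List.ext_getElem
    · rw [hA.1, hB.1]
    · intro idx h1 h2
      have e1 : ((List.range lk.length).foldl (stepO lk lkl) (g, gl)).1.getD idx 0
          = ((List.range gl.length).foldl (stepB lk lkl) (g, gl)).1.getD idx 0 := by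
        rw [(hAc idx 0).1, (hBc idx 0).1]
        cases hh : hitIdx lkl lk.length idx with
        | none => split_ifs <;> rfl
        | some i =>
            have hjlt := hub idx i hh
            by_cases hgl : gl.getD idx 0 = 0
            · simp [hjlt]
            · have hgl' : (gl[idx]?.getD 0 = 0) ↔ False := iff_false_intro hgl
              simp [hgl']
      rwa [List.getD_eq_getElem _ _ h1, List.getD_eq_getElem _ _ h2] at e1
  · apply List.ext_getElem
    · rw [hA.2, hB.2]
    · intro idx h1 h2
      have e2 : ((List.range lk.length).foldl (stepO lk lkl) (g, gl)).2.getD idx 0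
          = ((List.range gl.length).foldl (stepB lk lkl) (g, gl)).2.getD idx 0 := by
        rw [(hAc idx 0).2, (hBc idx 0).2]
        cases hh : hitIdx lkl lk.length idx with
        | none => simp
        | some i =>
            have hjlt := hub idx i hh
            by_cases hgl : gl.getD idx 0 = 0
            · simp [hjlt]
            · have hgl' : (gl[idx]?.getD 0 = 0) ↔ False := iff_false_intro hgl
              simp [hgl']
      rwa [List.getD_eq_getElem _ _ h1, List.getD_eq_getElem _ _ h2] at e2
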